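-- pv_equiv track=rewrite | github.com/gavinsykes/project-euler | python_testing.py | divisible_by_7_algorithm
-- ===== SOURCE A (Python) =====
-- def divisible_by_7_algorithm(n: int) -> bool:
--   if n < 7:
--     return False
--   if n in (7,14,21,28,35,42,49,56,63,70,77,84,91,98,105,112,119,126,133,140):
--     return True
--   last_digit_doubled = int(str(n)[-1]) * 2
--   remainder = int(str(n)[-1:])
--   result = remainder - last_digit_doubled
--   if result not in range(7,141):
--     return divisible_by_7_algorithm(result)
--   if result in (0,7,14,21,28,35,42,49,56,63,70,77,84,91,98,105,112,119,126,133,140):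
--     return True
--   return False
-- ===== SOURCE B (Python) =====
-- def divisible_by_7_algorithm(n: int) -> bool:
--   # A's digit trick always degenerates: the recursive branch gets -last_digit
--   # and returns False, so A is exactly a table lookup of multiples of 7 up to 140.
--   return 7 <= n <= 140 and n % 7 == 0
-- ===== Notes on version B (the rewrite author's own statement) =====
-- stated objective: simpler
-- what changed: Replaces the recursive string/digit manipulation and hard-coded tuple scans with a single closed-form check: n is a multiple of 7 in 7..140 (the recursive branch of A always receives -last_digit and returns False, so A's value is exactly this predicate).
import Mathlib
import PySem

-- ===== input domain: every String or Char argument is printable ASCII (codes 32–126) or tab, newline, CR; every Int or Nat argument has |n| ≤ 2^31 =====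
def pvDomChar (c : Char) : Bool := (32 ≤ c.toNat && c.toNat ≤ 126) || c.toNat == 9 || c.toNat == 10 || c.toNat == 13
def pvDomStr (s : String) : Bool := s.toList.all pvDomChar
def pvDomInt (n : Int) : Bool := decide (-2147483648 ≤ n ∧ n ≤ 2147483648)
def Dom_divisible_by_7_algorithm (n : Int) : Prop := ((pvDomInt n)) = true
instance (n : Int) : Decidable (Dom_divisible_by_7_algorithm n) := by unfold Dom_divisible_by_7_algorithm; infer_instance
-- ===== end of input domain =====

-- B replaces A's recursive digit manipulation with the closed-form check "multiple of 7 in 7..140" (simpler).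


-- ===== PORT A =====
-- the tuple literal (7,14,…,140) of A
def pvTable : List Int := [7,14,21,28,35,42,49,56,63,70,77,84,91,98,105,112,119,126,133,140]

-- termination helpers for the port's recursion (cited in decreasing_by):
-- the last character of str(m) for m ≥ 0 is the digit char of m % 10
theorem pvToDigitsCore_getLast (b : Nat) : ∀ (f n : Nat) (ds : List Char) (c : Char),
    (Nat.toDigitsCore b f n (ds ++ [c])).getLast? = some c := by
  intro f
  induction f with
  | zero => intro n ds c; simp [Nat.toDigitsCore]
  | succ f ih =>
    intro n ds c
    simp only [Nat.toDigitsCore]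
    by_cases h : n / b = 0
    · rw [if_pos h, show ((n % b).digitChar :: (ds ++ [c])) = ((n % b).digitChar :: ds) ++ [c] by simp,
         List.getLast?_concat]
    · rw [if_neg h]
      have := ih (n / b) (Nat.digitChar (n % b) :: ds) c
      simpa using this

theorem pvToDigits_getLast (m : Nat) :
    (Nat.toDigits 10 m).getLast? = some (Nat.digitChar (m % 10)) := by
  unfold Nat.toDigits
  simp only [Nat.toDigitsCore]
  by_cases h : m / 10 = 0
  · rw [if_pos h]; rfl
  · rw [if_neg h]
    have := pvToDigitsCore_getLast 10 m (m / 10) [] (Nat.digitChar (m % 10))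
    simpa using this

theorem pvLastChar (n : Int) (h : 0 ≤ n) :
    PySem.List.pyGet? (PySem.Int.toChars n) (-1) = some (Nat.digitChar (n.toNat % 10)) := by
  rw [PySem.List.pyGet?_neg_one]
  unfold PySem.Int.toChars
  rw [if_neg (by omega)]
  exact pvToDigits_getLast n.toNat

theorem pvDropLast_eq (xs : List Char) (c : Char) (h : xs.getLast? = some c) :
    xs.drop (xs.length - 1) = [c] := by
  induction xs with
  | nil => simp at h
  | cons a xs ih =>
    cases xs with
    | nil => simp at h; simp [h]
    | cons b ys =>
      rw [List.getLast?_cons_cons] at h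
      have := ih h
      simpa using this

theorem pvOfCharsDigit (d : Nat) (hd : d < 10) :
    PySem.Int.ofChars? [Nat.digitChar d] = some (d : Int) := by
  interval_cases d <;> decide

-- values of the two int(...) parses in A's body, for n ≥ 0
theorem pvParse1 (n : Int) (h : 0 ≤ n) (c : Char)
    (hc : PySem.List.pyGet? (PySem.Int.toChars n) (-1) = some c) :
    PySem.Int.ofChars? [c] = some ((n.toNat % 10 : Nat) : Int) := by
  rw [pvLastChar n h] at hc
  cases hc
  exact pvOfCharsDigit _ (Nat.mod_lt _ (by omega))

theorem pvParse2 (n : Int) (h : 0 ≤ n) :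
    PySem.Int.ofChars? (PySem.List.slice (PySem.Int.toChars n) (some (-1)) none)
      = some ((n.toNat % 10 : Nat) : Int) := by
  rw [PySem.List.slice_from_neg_one]
  rw [pvDropLast_eq _ _ (by rw [← PySem.List.pyGet?_neg_one]; exact pvLastChar n h)]
  exact pvOfCharsDigit _ (Nat.mod_lt _ (by omega))

def divisible_by_7_algorithm (n : Int) : Bool :=
  if h7 : n < 7 then false
  else if pvTable.contains n then true
  else
    -- int(str(n)[-1]) : str(n)[-1] is one char; Python raises only if str(n) were
    -- empty or non-numeric, which cannot happen — the none branches are unreachable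
    match hc : PySem.List.pyGet? (PySem.Int.toChars n) (-1) with
    | none => false
    | some c =>
      match hl : PySem.Int.ofChars? [c] with
      | none => false
      | some ld =>
        let last_digit_doubled := ld * 2
        match hr : PySem.Int.ofChars? (PySem.List.slice (PySem.Int.toChars n) (some (-1)) none) with
        | none => false
        | some remainder =>
          let result := remainder - last_digit_doubled
          if ¬ (7 ≤ result ∧ result < 141) then divisible_by_7_algorithm result
          else if (0 :: pvTable).contains result then true
          else false
termination_by n.toNat
decreasing_by
  have h0 : (0:Int) ≤ n := by omega
  have h1 := pvParse1 n h0 c hc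
  have h2 := pvParse2 n h0
  rw [hl] at h1; rw [hr] at h2
  cases h1; cases h2
  omega

-- ===== PORT B =====
def divisible_by_7_algorithm_alt (n : Int) : Bool :=
  decide (7 ≤ n ∧ n ≤ 140) && (PySem.Int.mod n 7 == 0)

-- ===== PRECONDITION & SPEC =====
def Spec_divisible_by_7_algorithm (n : Int) (out : Bool) : Prop := out = divisible_by_7_algorithm_alt n
instance (n : Int) (out : Bool) : Decidable (Spec_divisible_by_7_algorithm n out) := by unfold Spec_divisible_by_7_algorithm; infer_instance

-- ===== CLAIM (what is proved, stated in full; the proofs are below) =====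
def Claim_equal_divisible_by_7_algorithm : Prop := ∀ (n : Int), Dom_divisible_by_7_algorithm n → Spec_divisible_by_7_algorithm n (divisible_by_7_algorithm n)

-- ===== LEMMAS AND PROOFS =====

-- membership of A's table is exactly "multiple of 7 in 7..140"
theorem pvTable_mem (n : Int) : pvTable.contains n = true ↔ (7 ≤ n ∧ n ≤ 140 ∧ 7 ∣ n) := by
  simp only [pvTable, List.contains_cons, List.contains_nil, Bool.or_eq_true, beq_iff_eq]
  constructor
  · rintro h
    rcases h with h|h|h|h|h|h|h|h|h|h|h|h|h|h|h|h|h|h|h|h|h <;> simp_all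
  · rintro ⟨h1, h2, h3⟩
    omega

-- ===== VERDICT (by name: the statement is the Claim_ definition above) =====
theorem divisible_by_7_algorithm_spec : Claim_equal_divisible_by_7_algorithm := by
  unfold Claim_equal_divisible_by_7_algorithm
  intro n _
  unfold Spec_divisible_by_7_algorithm
  by_cases h7 : n < 7
  · rw [divisible_by_7_algorithm.eq_def, dif_pos h7]
    unfold divisible_by_7_algorithm_alt
    have : ¬ (7 ≤ n ∧ n ≤ 140) := by omega
    simp [this]
  · by_cases ht : pvTable.contains n = true
    · rw [divisible_by_7_algorithm.eq_def, dif_neg h7, if_pos ht]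
      obtain ⟨ha, hb, hc⟩ := (pvTable_mem n).mp ht
      unfold divisible_by_7_algorithm_alt
      have : PySem.Int.mod n 7 = 0 := (PySem.Int.mod_eq_zero_iff_dvd n 7).mpr hc
      simp [ha, hb, hc]
    · have h0 : (0:Int) ≤ n := by omega
      have hB : divisible_by_7_algorithm_alt n = false := by
        have key : ¬ (7 ≤ n ∧ n ≤ 140) ∨ ¬ (7:Int) ∣ n := by
          by_cases hr : (7:Int) ∣ n
          · left; intro hrange
            exact absurd ((pvTable_mem n).mpr ⟨hrange.1, hrange.2, hr⟩) (by simpa using ht)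
          · right; exact hr
        rcases key with h | h
        · simp [divisible_by_7_algorithm_alt, h]
        · simp [divisible_by_7_algorithm_alt]
          exact fun _ _ => h
      rw [hB, divisible_by_7_algorithm.eq_def, dif_neg h7, if_neg ht]
      split
      · rfl
      · rename_i c heq
        have hc' : c = Nat.digitChar (n.toNat % 10) := by
          have h2 := pvLastChar n h0; rw [heq] at h2; exact Option.some_inj.mp h2
        subst hc'
        split
        · rename_i heq2
          rw [pvOfCharsDigit _ (Nat.mod_lt _ (by omega))] at heq2
        · rename_i ld heq2
          rw [pvOfCharsDigit _ (Nat.mod_lt _ (by omega))] at heq2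
          cases heq2
          split
          · rename_i heq3
            rw [pvParse2 n h0] at heq3
          · rename_i remainder heq3
            rw [pvParse2 n h0] at heq3
            cases heq3
            set d : Int := ((n.toNat % 10 : Nat) : Int) with hd
            have hdnn : 0 ≤ d := by positivity
            rw [if_pos (by omega : ¬ (7 ≤ d - d * 2 ∧ d - d * 2 < 141))]
            rw [divisible_by_7_algorithm.eq_def, dif_pos (by omega : d - d * 2 < 7)]
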